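-- pv_equiv track=rewrite | github.com/Clusm/AI_novel | src/generator.py | _split_opening_and_rest
-- ===== SOURCE A (Python) =====
-- def _split_opening_and_rest(body: str) -> tuple[str, str]:
--     """将正文分割为开头部分和剩余部分"""
--     parts = [p.strip() for p in (body or "").split("\n\n") if p.strip()]
--     if not parts:
--         return "", ""
--     opening_parts = []
--     acc = 0
--     for p in parts:
--         opening_parts.append(p)
--         acc += len(p)
--         if len(opening_parts) >= 2 and acc >= 240:
--             break
--         if len(opening_parts) >= 3:
--             break
--     opening = "\n\n".join(opening_parts).strip()
--     rest = "\n\n".join(parts[len(opening_parts):]).strip()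
--     return opening, rest
-- ===== SOURCE B (Python) =====
-- def _split_opening_and_rest(body: str) -> tuple[str, str]:
--     """Split body into opening paragraphs and the rest (closed-form cut index)."""
--     parts = [p.strip() for p in (body or "").split("\n\n") if p.strip()]
--     if not parts:
--         return "", ""
--     if len(parts) == 1:
--         k = 1
--     elif len(parts[0]) + len(parts[1]) >= 240:
--         k = 2
--     else:
--         k = min(3, len(parts))
--     return "\n\n".join(parts[:k]), "\n\n".join(parts[k:])
-- ===== Notes on version B (the rewrite author's own statement) =====
-- stated objective: simpler
-- what changed: Replaces the accumulating append/break loop by a closed-form computation of the cut index k (1 if one paragraph, 2 if the first two total >= 240 chars, else min(3, n)) and slices parts[:k]/parts[k:], dropping the final no-op strips.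
import Mathlib
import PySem

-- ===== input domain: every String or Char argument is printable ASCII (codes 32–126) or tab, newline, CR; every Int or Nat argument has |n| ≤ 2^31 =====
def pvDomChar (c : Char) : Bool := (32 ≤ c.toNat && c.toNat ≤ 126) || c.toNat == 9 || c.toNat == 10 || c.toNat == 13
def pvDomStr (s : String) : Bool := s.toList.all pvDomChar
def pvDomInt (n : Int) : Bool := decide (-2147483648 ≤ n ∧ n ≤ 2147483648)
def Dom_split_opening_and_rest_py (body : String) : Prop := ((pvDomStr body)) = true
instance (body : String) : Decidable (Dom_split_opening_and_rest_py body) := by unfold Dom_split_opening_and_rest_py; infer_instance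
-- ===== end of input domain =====

-- B replaces A's accumulating append/break loop by a closed-form cut index and slicing,
-- and drops A's final strips (no-ops on pre-stripped paragraphs); objective: simpler.

-- ===== PORT A =====
-- the for-loop over parts with its two break conditions, state = (opening_parts, acc)
def pvLoopA : List (List Char) → List (List Char) → Int → List (List Char)
  | [], ops, _ => ops
  | p :: ps, ops, acc =>
      let ops' := ops ++ [p]
      let acc' := acc + (p.length : Int)
      if 2 ≤ ops'.length ∧ 240 ≤ acc' then ops'
      else if 3 ≤ ops'.length then ops'
      else pvLoopA ps ops' acc'

def split_opening_and_rest_py (body : String) : String × String :=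
  let parts := ((PySem.Chars.splitOn body.toList ['\n', '\n']).map PySem.Chars.strip).filter
      (fun p => p ≠ [])
  if parts = [] then ("", "")
  else
    let ops := pvLoopA parts [] 0
    (String.ofList (PySem.Chars.strip (PySem.Chars.join ['\n', '\n'] ops)),
     String.ofList (PySem.Chars.strip (PySem.Chars.join ['\n', '\n'] (parts.drop ops.length))))

-- ===== PORT B =====
def split_opening_and_rest_py_alt (body : String) : String × String :=
  let parts := ((PySem.Chars.splitOn body.toList ['\n', '\n']).map PySem.Chars.strip).filter
      (fun p => p ≠ [])
  if parts = [] then ("", "")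
  else
    let k : Nat :=
      if parts.length = 1 then 1
      else if 240 ≤ (parts[0]!.length : Int) + (parts[1]!.length : Int) then 2
      else min 3 parts.length
    (String.ofList (PySem.Chars.join ['\n', '\n'] (parts.take k)),
     String.ofList (PySem.Chars.join ['\n', '\n'] (parts.drop k)))

-- ===== PRECONDITION & SPEC =====
def Spec_split_opening_and_rest_py (body : String) (out : String × String) : Prop := out = split_opening_and_rest_py_alt body
instance (body : String) (out : String × String) : Decidable (Spec_split_opening_and_rest_py body out) := by unfold Spec_split_opening_and_rest_py; infer_instance

-- ===== CLAIM (what is proved, stated in full; the proofs are below) =====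
def Claim_equal_split_opening_and_rest_py : Prop := ∀ (body : String), Dom_split_opening_and_rest_py body → Spec_split_opening_and_rest_py body (split_opening_and_rest_py body)

-- ===== LEMMAS AND PROOFS =====

theorem pv_dropWhile_idem {α : Type} (p : α → Bool) (l : List α) :
    (l.dropWhile p).dropWhile p = l.dropWhile p := by
  induction l with
  | nil => rfl
  | cons c t ih =>
    by_cases hc : p c = true
    · rw [List.dropWhile_cons_of_pos hc]; exact ih
    · simp only [Bool.not_eq_true] at hc
      rw [List.dropWhile_cons_of_neg (by simp [hc]), List.dropWhile_cons_of_neg (by simp [hc])]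

theorem pv_head_false {α : Type} (p : α → Bool) (c : α) (t : List α)
    (h : List.dropWhile p (c :: t) = c :: t) : p c = false := by
  by_cases hc : p c = true
  · rw [List.dropWhile_cons_of_pos hc] at h
    have hle := List.length_dropWhile_le p t
    rw [h] at hle
    simp at hle
  · simpa using hc

theorem pv_dropWhile_append {α : Type} (p : α → Bool) (x y : List α) (hx : x ≠ [])
    (h : List.dropWhile p x = x) : List.dropWhile p (x ++ y) = x ++ y := by
  cases x with
  | nil => exact absurd rfl hx
  | cons c t =>
    have hc := pv_head_false p c t h
    rw [List.cons_append, List.dropWhile_cons_of_neg (by simp [hc]), ← List.cons_append]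

theorem pv_rstrip_strip (q : List Char) :
    PySem.Chars.rstrip (PySem.Chars.strip q) = PySem.Chars.strip q := by
  simp [PySem.Chars.strip, PySem.Chars.rstrip, pv_dropWhile_idem]

theorem pv_lstrip_strip (q : List Char) :
    PySem.Chars.lstrip (PySem.Chars.strip q) = PySem.Chars.strip q := by
  have hidem : PySem.Chars.lstrip (PySem.Chars.lstrip q) = PySem.Chars.lstrip q :=
    pv_dropWhile_idem _ _
  set z := PySem.Chars.lstrip q with hz
  show PySem.Chars.lstrip (PySem.Chars.rstrip z) = PySem.Chars.rstrip z
  have hpre : PySem.Chars.rstrip z <+: z := by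
    unfold PySem.Chars.rstrip
    have := List.dropWhile_suffix (l := z.reverse) PySem.Chars.isspace
    rw [← List.reverse_prefix] at this
    simpa using this
  cases hrz : PySem.Chars.rstrip z with
  | nil => simp [PySem.Chars.lstrip]
  | cons c t =>
    rw [hrz] at hpre
    obtain ⟨s, hs⟩ := hpre
    have hc : PySem.Chars.isspace c = false := by
      apply pv_head_false PySem.Chars.isspace c (t ++ s)
      have : List.dropWhile PySem.Chars.isspace (c :: t ++ s) = c :: t ++ s := by
        rw [hs]; exact hidem
      simpa using this
    unfold PySem.Chars.lstrip
    rw [List.dropWhile_cons_of_neg (by simp [hc])]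

-- every kept paragraph is nonempty and strip-invariant on both ends
def pvGood (l : List Char) : Prop :=
  l ≠ [] ∧ PySem.Chars.lstrip l = l ∧ PySem.Chars.rstrip l = l

theorem pv_good_of_strip (q : List Char) (h : PySem.Chars.strip q ≠ []) :
    pvGood (PySem.Chars.strip q) :=
  ⟨h, pv_lstrip_strip q, pv_rstrip_strip q⟩

theorem pv_join_ne_nil (sep a : List Char) (l : List (List Char)) (ha : a ≠ []) :
    PySem.Chars.join sep (a :: l) ≠ [] := by
  cases l with
  | nil => simpa [PySem.Chars.join, List.intercalate] using ha
  | cons b r =>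
    simp only [PySem.Chars.join, List.intercalate, List.intersperse]
    simp [ha]

theorem pv_lstrip_join (sep a : List Char) (l : List (List Char)) (ha : pvGood a) :
    PySem.Chars.lstrip (PySem.Chars.join sep (a :: l)) = PySem.Chars.join sep (a :: l) := by
  obtain ⟨hne, hl, _⟩ := ha
  cases l with
  | nil => simpa [PySem.Chars.join, List.intercalate] using hl
  | cons b r =>
    have : PySem.Chars.join sep (a :: b :: r) = a ++ (sep ++ PySem.Chars.join sep (b :: r)) := by
      simp [PySem.Chars.join, List.intercalate, List.intersperse]
    rw [this]
    exact pv_dropWhile_append _ _ _ hne hl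

theorem pv_rstrip_join (sep : List Char) (l : List (List Char))
    (h : ∀ q ∈ l, pvGood q) :
    PySem.Chars.rstrip (PySem.Chars.join sep l) = PySem.Chars.join sep l := by
  induction l with
  | nil => simp [PySem.Chars.join, List.intercalate, PySem.Chars.rstrip]
  | cons a r ih =>
    cases r with
    | nil =>
      have := (h a (by simp)).2.2
      simpa [PySem.Chars.join, List.intercalate] using this
    | cons b r' =>
      have hjoin : PySem.Chars.join sep (a :: b :: r') =
          (a ++ sep) ++ PySem.Chars.join sep (b :: r') := by
        simp [PySem.Chars.join, List.intercalate, List.intersperse]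
      have hrest : PySem.Chars.rstrip (PySem.Chars.join sep (b :: r')) =
          PySem.Chars.join sep (b :: r') := ih (fun q hq => h q (List.mem_cons_of_mem _ hq))
      have hne : PySem.Chars.join sep (b :: r') ≠ [] :=
        pv_join_ne_nil sep b r' (h b (by simp)).1
      rw [hjoin]
      unfold PySem.Chars.rstrip at hrest ⊢
      rw [List.reverse_append]
      have hself : List.dropWhile PySem.Chars.isspace (PySem.Chars.join sep (b :: r')).reverse =
          (PySem.Chars.join sep (b :: r')).reverse := by
        have := congrArg List.reverse hrest
        simpa using this
      rw [pv_dropWhile_append _ _ _ (by simpa using hne) hself]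
      simp

theorem pv_strip_join (sep : List Char) (l : List (List Char)) (h : ∀ q ∈ l, pvGood q) :
    PySem.Chars.strip (PySem.Chars.join sep l) = PySem.Chars.join sep l := by
  cases l with
  | nil => simp [PySem.Chars.join, List.intercalate, PySem.Chars.strip, PySem.Chars.lstrip,
      PySem.Chars.rstrip]
  | cons a r =>
    unfold PySem.Chars.strip
    rw [pv_lstrip_join sep a r (h a (by simp)), pv_rstrip_join sep _ h]

-- A's loop computed in closed form, case by case on the paragraph list
theorem pv_strip_nil : PySem.Chars.strip [] = [] := rfl

theorem pv_strip_of_good (l : List Char) (h : pvGood l) : PySem.Chars.strip l = l := by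
  obtain ⟨-, hl, hr⟩ := h
  simp [PySem.Chars.strip, hl, hr]

theorem pv_loop_one (a : List Char) : pvLoopA [a] [] 0 = [a] := by
  simp [pvLoopA]

theorem pv_loop_two (a b : List Char) : pvLoopA [a, b] [] 0 = [a, b] := by
  simp [pvLoopA]

theorem pv_loop_big_cut (a b c : List Char) (r : List (List Char))
    (h : 240 ≤ (a.length : Int) + (b.length : Int)) :
    pvLoopA (a :: b :: c :: r) [] 0 = [a, b] := by
  simp [pvLoopA, h]

theorem pv_loop_big_three (a b c : List Char) (r : List (List Char))
    (h : ¬ 240 ≤ (a.length : Int) + (b.length : Int)) :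
    pvLoopA (a :: b :: c :: r) [] 0 = [a, b, c] := by
  simp [pvLoopA, h]

-- core equivalence over any list of good paragraphs
theorem pv_core (parts : List (List Char)) (h : ∀ q ∈ parts, pvGood q) :
    (if parts = [] then (("" : String), ("" : String))
     else
       let ops := pvLoopA parts [] 0
       (String.ofList (PySem.Chars.strip (PySem.Chars.join ['\n', '\n'] ops)),
        String.ofList (PySem.Chars.strip (PySem.Chars.join ['\n', '\n'] (parts.drop ops.length)))))
    =
    (if parts = [] then (("" : String), ("" : String))
     else
       let k : Nat :=
         if parts.length = 1 then 1
         else if 240 ≤ (parts[0]!.length : Int) + (parts[1]!.length : Int) then 2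
         else min 3 parts.length
       (String.ofList (PySem.Chars.join ['\n', '\n'] (parts.take k)),
        String.ofList (PySem.Chars.join ['\n', '\n'] (parts.drop k)))) := by
  match parts, h with
  | [], _ => rfl
  | [a], h =>
    have e1 := pv_strip_of_good a (h a (by simp))
    simp [pv_loop_one, e1, pv_strip_nil]
  | [a, b], h =>
    have e1 := pv_strip_join ['\n', '\n'] [a, b] h
    by_cases h240 : 240 ≤ (a.length : Int) + (b.length : Int) <;>
      simp [pv_loop_two, e1, pv_strip_nil, h240]
  | a :: b :: c :: r, h =>
    have hmem : ∀ q ∈ a :: b :: c :: r, pvGood q := h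
    have hgood2 : ∀ q ∈ [a, b], pvGood q := by
      intro q hq
      apply h
      simp only [List.mem_cons] at hq ⊢
      tauto
    have hgood3 : ∀ q ∈ [a, b, c], pvGood q := by
      intro q hq
      apply h
      simp only [List.mem_cons] at hq ⊢
      tauto
    have hgoodcr : ∀ q ∈ c :: r, pvGood q := by
      intro q hq
      apply h
      simp only [List.mem_cons] at hq ⊢
      tauto
    have hgoodr : ∀ q ∈ r, pvGood q :=
      fun q hq => h q (by simp only [List.mem_cons]; tauto)
    have e2 := pv_strip_join ['\n', '\n'] (c :: r) hgoodcr
    have e3 := pv_strip_join ['\n', '\n'] r hgoodr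
    by_cases h240 : 240 ≤ (a.length : Int) + (b.length : Int)
    · have hloop := pv_loop_big_cut a b c r h240
      have eop := pv_strip_join ['\n', '\n'] [a, b] hgood2
      simp [hloop, eop, e2, h240]
    · have hloop := pv_loop_big_three a b c r h240
      have eop := pv_strip_join ['\n', '\n'] [a, b, c] hgood3
      simp [hloop, eop, e3, h240]

-- ===== VERDICT (by name: the statement is the Claim_ definition above) =====
theorem split_opening_and_rest_py_spec : Claim_equal_split_opening_and_rest_py := by
  unfold Claim_equal_split_opening_and_rest_py
  intro body _
  unfold Spec_split_opening_and_rest_py split_opening_and_rest_py split_opening_and_rest_py_alt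
  apply pv_core
  intro q hq
  simp only [List.mem_filter, List.mem_map, decide_not] at hq
  obtain ⟨⟨x, _, rfl⟩, hne⟩ := hq
  exact pv_good_of_strip x (by simpa using hne)
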